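-- pv_equiv track=rewrite | github.com/bee1019/CSE101HW2-2 | 32fp.py | getBiasedExponent
-- ===== SOURCE A (Python) =====
-- def getBiasedExponent(exp): # exp is an integer
--     binary = ""
--     if exp < -127 or exp > 128:
--         return None
--     else:
--         exp += 127
--         binary = bin(exp)
--         binary = binary[2:]
--
--         while len(binary) < 8:
--             binary = "0" + binary
--
--     return binary
-- ===== SOURCE B (Python) =====
-- def getBiasedExponent(exp): # exp is an integer
--     if exp < -127 or exp > 128:
--         return None
--     n = exp + 127
--     out = ""
--     for i in range(7, -1, -1):
--         out = out + ("1" if (n >> i) & 1 else "0")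
--     return out
-- ===== Notes on version B (the rewrite author's own statement) =====
-- stated objective: alternative
-- what changed: B builds the 8-bit string by extracting bits directly with shifts and masks (MSB to LSB) instead of A's bin()-conversion followed by a left-padding while loop.
import Mathlib
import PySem

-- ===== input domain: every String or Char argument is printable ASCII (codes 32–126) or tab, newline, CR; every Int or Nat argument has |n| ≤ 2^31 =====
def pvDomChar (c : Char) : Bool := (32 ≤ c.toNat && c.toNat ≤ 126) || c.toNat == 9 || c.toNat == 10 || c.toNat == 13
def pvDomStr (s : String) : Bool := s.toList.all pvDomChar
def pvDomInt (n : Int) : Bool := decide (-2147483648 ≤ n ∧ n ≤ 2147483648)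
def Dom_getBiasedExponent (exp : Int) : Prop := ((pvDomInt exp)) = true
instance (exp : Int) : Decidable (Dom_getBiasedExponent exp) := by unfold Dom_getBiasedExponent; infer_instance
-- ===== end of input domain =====

-- B builds the 8-bit string by extracting bits directly with shifts (MSB→LSB) instead of A's bin()+left-padding while loop; same O(1) cost, different decomposition.
-- Strings are ported on the List Char side (PySem convention) and wrapped with String.ofList.

-- ===== PORT A =====
-- the while loop: while len(binary) < 8: binary = "0" + binary.
-- fuel 8 only makes the recursion structural: each step re-checks len < 8 exactly like the
-- Python loop, and the length grows by 1 per step so 8 steps always suffice.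
def pvPadC : Nat → List Char → List Char
  | 0, s => s
  | f+1, s => if s.length < 8 then pvPadC f ('0' :: s) else s

def getBiasedExponent (exp : Int) : Option String :=
  if exp < -127 ∨ exp > 128 then none
  else
    let binary := PySem.Int.toBinChars0b (exp + 127)        -- bin(exp) after exp += 127
    let binary := PySem.List.slice binary (some 2) none     -- binary[2:]
    some (String.ofList (pvPadC 8 binary))

-- ===== PORT B =====
def getBiasedExponent_alt (exp : Int) : Option String :=
  if exp < -127 ∨ exp > 128 then none
  else
    -- n = exp + 127 ≥ 0 and i ∈ [0,7] in this branch, so .toNat on both is exact for (n >> i) & 1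
    let n := (exp + 127).toNat
    some (String.ofList ((PySem.List.pyRange 7 (-1) (-1)).foldl
      (fun acc i => acc ++ (if (n >>> i.toNat) &&& 1 ≠ 0 then ['1'] else ['0'])) []))

-- ===== PRECONDITION & SPEC =====
def Spec_getBiasedExponent (exp : Int) (out : Option String) : Prop := out = getBiasedExponent_alt exp
instance (exp : Int) (out : Option String) : Decidable (Spec_getBiasedExponent exp out) := by unfold Spec_getBiasedExponent; infer_instance

-- ===== CLAIM (what is proved, stated in full; the proofs are below) =====
def Claim_equal_getBiasedExponent : Prop := ∀ (exp : Int), Dom_getBiasedExponent exp → Spec_getBiasedExponent exp (getBiasedExponent exp)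

-- ===== LEMMAS AND PROOFS =====
-- On every possible biased value k < 256 the two branch bodies agree (finite check on char lists).
set_option maxRecDepth 10000 in
theorem pv_key : ∀ k : Nat, k < 256 →
    pvPadC 8 (PySem.List.slice (PySem.Int.toBinChars0b (k : Int)) (some 2) none) =
      (PySem.List.pyRange 7 (-1) (-1)).foldl
        (fun acc (i : Int) => acc ++ (if (k >>> i.toNat) &&& 1 ≠ 0 then ['1'] else ['0'])) [] := by
  decide

-- ===== VERDICT (by name: the statement is the Claim_ definition above) =====
theorem getBiasedExponent_spec : Claim_equal_getBiasedExponent := by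
  intro exp _
  unfold Spec_getBiasedExponent getBiasedExponent getBiasedExponent_alt
  by_cases h : exp < -127 ∨ exp > 128
  · simp [h]
  · have hge : (0:Int) ≤ exp + 127 := by omega
    have hk : (exp + 127).toNat < 256 := by omega
    have hcast : exp + 127 = ((exp + 127).toNat : Int) := by omega
    simp only [h, if_false]
    rw [hcast]
    exact congrArg (fun l => some (String.ofList l)) (pv_key _ hk)
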